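/- Every contract file of the program, imported together (a consistency check: no name is defined twice). -/
import Gif.Spec.Common
import Gif.Spec.CommonMore
import Gif.Spec.ForestCarry
import Gif.Spec.Reader
import Gif.Spec.Alloc
import Gif.Spec.Lzw
import Gif.Spec.Desc
import Gif.Spec.Slurp
import Gif.Spec.Driver
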